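-- pv_equiv track=rewrite | github.com/JakubPrzystasz/Algorytmy-zast-powania-stron | MFU.py | znajdz_maximum_slownik
-- ===== SOURCE A (Python) =====
-- def znajdz_maximum_slownik(strony_odwolania, ramki, oprocz,x):  # oprocz - nie moze wybrac tej samej ramki bo sie zapętli
--     dostepne_strony = []
--     indeks = 0
--     czy_kilka = 0 # czy powtarzają się maxima jeśli nie to zmienna oprócz musi wynosić -1 bo jej nie używamy
--
--     for i in range(len(ramki)):  # przepisuje wszystkie strony jakie zawierają ramki
--         dostepne_strony.append(ramki[i][x])  # indeksy dostepne_strony odpowiadają indeksom ramki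
--
--     max = strony_odwolania[dostepne_strony[0]]  # zakładamy że to jest najwieksza wartość
--
--     for j in range(len(dostepne_strony)):  # znajduje wartość największa
--         if (max <= strony_odwolania[dostepne_strony[j]]):
--             max = strony_odwolania[dostepne_strony[j]]
--
--     for j in range(len(dostepne_strony)):  # znajduje ile razy wystąpiła wartość największa
--         if (max == strony_odwolania[dostepne_strony[j]]):
--             czy_kilka += 1
--
--     if(czy_kilka == 1 ): # bo jeżeli jest jedna wartość maximum no to musimy ją wziąść nie mamy wyboru
--         oprocz = -1
--
--     for k in range(len(dostepne_strony)):  # sprawdza 1 wystąpienie wartości maximum, omijając indeks oprócz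
--         if (strony_odwolania[dostepne_strony[k]] == max and k != oprocz):
--             indeks = k
--             break
--
--     return indeks
-- ===== SOURCE B (Python) =====
-- def znajdz_maximum_slownik(strony_odwolania, ramki, oprocz, x):
--     # single pass over the frames: maintain the running max, how many times it
--     # occurs, its first position, and the first max position different from oprocz
--     m = strony_odwolania[ramki[0][x]]
--     cnt = 0
--     first = 0
--     alt = -1
--     for i, r in enumerate(ramki):
--         v = strony_odwolania[r[x]]
--         if v > m:
--             m, cnt, first = v, 1, i
--             alt = i if i != oprocz else -1
--         elif v == m:
--             cnt += 1
--             if alt < 0 and i != oprocz: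
--                 alt = i
--     return first if cnt == 1 else alt
-- ===== Notes on version B (the rewrite author's own statement) =====
-- stated objective: alternative
-- what changed: B replaces A's four staged passes (copy the values, find the max, count its occurrences, rescan for the first admissible position) by ONE pass with a four-field accumulator (running max, its occurrence count, its first position, and the first max position different from oprocz), selecting the answer from the accumulator at the end.
import Mathlib
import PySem

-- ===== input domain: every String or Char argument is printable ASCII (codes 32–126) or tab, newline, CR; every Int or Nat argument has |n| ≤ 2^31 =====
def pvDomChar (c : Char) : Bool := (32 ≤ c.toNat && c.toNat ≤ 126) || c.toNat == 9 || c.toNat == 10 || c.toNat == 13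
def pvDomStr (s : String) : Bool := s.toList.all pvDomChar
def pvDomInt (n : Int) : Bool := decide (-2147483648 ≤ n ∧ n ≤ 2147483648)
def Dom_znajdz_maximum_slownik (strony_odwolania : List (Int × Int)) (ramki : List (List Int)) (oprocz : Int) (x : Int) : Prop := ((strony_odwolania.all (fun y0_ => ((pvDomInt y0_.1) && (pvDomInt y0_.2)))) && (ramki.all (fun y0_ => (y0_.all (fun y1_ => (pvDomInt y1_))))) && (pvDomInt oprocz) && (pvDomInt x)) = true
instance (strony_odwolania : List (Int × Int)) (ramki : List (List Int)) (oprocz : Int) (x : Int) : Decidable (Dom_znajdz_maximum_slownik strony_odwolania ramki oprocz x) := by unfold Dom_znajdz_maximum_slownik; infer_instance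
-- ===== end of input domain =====

-- B replaces A's four staged passes by a single pass with a four-field accumulator
-- (running max, its count, its first position, first max position != oprocz); objective: alternative.

-- dict lookup strony_odwolania[d] (first match; 0 is a junk default, Pre_ guarantees the key is present)
def pvVal (strony_odwolania : List (Int × Int)) (d : Int) : Int :=
  ((PySem.Dict.mk strony_odwolania).get? d).getD 0

-- ===== PORT A =====
-- for i in range(len(ramki)): dostepne_strony.append(ramki[i][x])
def pvA_dostepne (ramki : List (List Int)) (x : Int) : List Int :=
  (PySem.List.pyRange 0 (ramki.length : Int) 1).foldl
    (fun acc i => acc ++ [(PySem.List.pyGet? (PySem.List.pyGetD ramki i []) x).getD 0]) []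

-- max = strony_odwolania[dostepne_strony[0]]; for j in range(…): if max <= …: max = …
def pvA_max (s : List (Int × Int)) (L : List Int) : Int :=
  (PySem.List.pyRange 0 (L.length : Int) 1).foldl
    (fun m j => if m ≤ pvVal s (PySem.List.pyGetD L j 0)
                then pvVal s (PySem.List.pyGetD L j 0) else m)
    (pvVal s ((PySem.List.pyGet? L 0).getD 0))

-- for j in range(…): if max == …: czy_kilka += 1
def pvA_czy (s : List (Int × Int)) (L : List Int) (mx : Int) : Int :=
  (PySem.List.pyRange 0 (L.length : Int) 1).foldl
    (fun c j => if mx == pvVal s (PySem.List.pyGetD L j 0) then c + 1 else c) 0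

-- for k in range(…): if … == max and k != oprocz: indeks = k; break   (indeks starts at 0)
def pvA_szukaj (s : List (Int × Int)) (L : List Int) (mx : Int) (oprocz : Int) : Int :=
  ((PySem.List.pyRange 0 (L.length : Int) 1).find?
      (fun k => pvVal s (PySem.List.pyGetD L k 0) == mx && k != oprocz)).getD 0

def znajdz_maximum_slownik (strony_odwolania : List (Int × Int)) (ramki : List (List Int)) (oprocz : Int) (x : Int) : Int :=
  let dostepne := pvA_dostepne ramki x
  let mx := pvA_max strony_odwolania dostepne
  let czy := pvA_czy strony_odwolania dostepne mx
  let oprocz' := if czy == 1 then (-1 : Int) else oprocz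
  pvA_szukaj strony_odwolania dostepne mx oprocz'

-- ===== PORT B =====
-- the loop body of Source B: state (m, cnt, first, alt), one element (index i, value v)
def pvBStep (oprocz : Int) (st : Int × Int × Int × Int) (i v : Int) : Int × Int × Int × Int :=
  if v > st.1 then (v, 1, i, if i ≠ oprocz then i else -1)
  else if v == st.1 then
    (st.1, st.2.1 + 1, st.2.2.1, if st.2.2.2 < 0 ∧ i ≠ oprocz then i else st.2.2.2)
  else st

-- m = strony_odwolania[ramki[0][x]]; cnt, first, alt = 0, 0, -1;
-- for i, r in enumerate(ramki): v = strony_odwolania[r[x]]; …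
-- return first if cnt == 1 else alt
def znajdz_maximum_slownik_alt (strony_odwolania : List (Int × Int)) (ramki : List (List Int)) (oprocz : Int) (x : Int) : Int :=
  let st := (PySem.List.enumerate ramki).foldl
    (fun st p => pvBStep oprocz st p.1 (pvVal strony_odwolania ((PySem.List.pyGet? p.2 x).getD 0)))
    (pvVal strony_odwolania
      ((PySem.List.pyGet? ((PySem.List.pyGet? ramki 0).getD []) x).getD 0), 0, 0, -1)
  if st.2.1 == 1 then st.2.2.1 else st.2.2.2

-- ===== PRECONDITION & SPEC =====
-- Pre_ excludes exactly the inputs where Python A raises: empty ramki (IndexError on dostepne_strony[0]),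
-- a frame where index x is out of range (IndexError), or a page value missing from the dict (KeyError).
def Pre_znajdz_maximum_slownik (strony_odwolania : List (Int × Int)) (ramki : List (List Int)) (oprocz : Int) (x : Int) : Prop :=
  ramki ≠ [] ∧ ∀ r ∈ ramki, (PySem.List.pyGet? r x).isSome = true ∧
    ((PySem.Dict.mk strony_odwolania).get? ((PySem.List.pyGet? r x).getD 0)).isSome = true
instance (strony_odwolania : List (Int × Int)) (ramki : List (List Int)) (oprocz : Int) (x : Int) : Decidable (Pre_znajdz_maximum_slownik strony_odwolania ramki oprocz x) := by unfold Pre_znajdz_maximum_slownik; infer_instance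

def pvWitness_znajdz_maximum_slownik : (List (Int × Int)) × List (List Int) × Int × Int :=
  ([(1, 3), (2, 3), (3, 1)], [[1], [2], [3]], 0, 0)

def Spec_znajdz_maximum_slownik (strony_odwolania : List (Int × Int)) (ramki : List (List Int)) (oprocz : Int) (x : Int) (out : Int) : Prop := out = znajdz_maximum_slownik_alt strony_odwolania ramki oprocz x
instance (strony_odwolania : List (Int × Int)) (ramki : List (List Int)) (oprocz : Int) (x : Int) (out : Int) : Decidable (Spec_znajdz_maximum_slownik strony_odwolania ramki oprocz x out) := by unfold Spec_znajdz_maximum_slownik; infer_instance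

-- ===== CLAIM (what is proved, stated in full; the proofs are below) =====
def Claim_equal_znajdz_maximum_slownik : Prop := ∀ (strony_odwolania : List (Int × Int)) (ramki : List (List Int)) (oprocz : Int) (x : Int), Dom_znajdz_maximum_slownik strony_odwolania ramki oprocz x → Pre_znajdz_maximum_slownik strony_odwolania ramki oprocz x → Spec_znajdz_maximum_slownik strony_odwolania ramki oprocz x (znajdz_maximum_slownik strony_odwolania ramki oprocz x)

-- ===== LEMMAS AND PROOFS =====

-- proof-side normal form: the value list's max, and the positions holding it
def pvMaxOf (W : List Int) : Int :=
  W.foldl (fun m v => if v > m then v else m) ((PySem.List.pyGet? W 0).getD 0)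

def pvPoz (W : List Int) (m : Int) : List Int :=
  ((PySem.List.enumerate W).filter (fun p => p.2 == m)).map (·.1)

-- Int equality test is symmetric
theorem pv_beq_comm (a b : Int) : (a == b) = (b == a) := by
  by_cases h : a = b
  · simp [h]
  · simp [h, Ne.symm h]

-- A's first loop builds exactly ramki.map (fun r => r[x])
theorem pv_dostepne_eq (ramki : List (List Int)) (x : Int) :
    pvA_dostepne ramki x = ramki.map (fun r => (PySem.List.pyGet? r x).getD 0) := by
  unfold pvA_dostepne
  rw [PySem.List.foldl_pyRange_zero_pyGetD' ramki []
        (fun acc r => acc ++ [(PySem.List.pyGet? r x).getD 0]) []]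
  rw [PySem.List.foldl_append_singleton_eq_map]
  simp

-- the strict-compare fold step IS max
theorem pv_step_is_max : (fun (m v : Int) => if v > m then v else m) = max := by
  funext m v
  simp only [max_def]
  split_ifs <;> omega

-- A's running max over indices equals pvMaxOf of the value list
theorem pv_max_eq (s : List (Int × Int)) (L : List Int) (h : L ≠ []) :
    pvA_max s L = pvMaxOf (L.map (pvVal s)) := by
  obtain ⟨d, t, rfl⟩ := List.exists_cons_of_ne_nil h
  unfold pvA_max pvMaxOf
  rw [PySem.List.foldl_pyRange_zero_pyGetD' (d :: t) 0
        (fun m v => if m ≤ pvVal s v then pvVal s v else m)]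
  rw [List.foldl_map]
  have hf : (fun (m v : Int) => if pvVal s v > m then pvVal s v else m)
      = fun m v => if m ≤ pvVal s v then pvVal s v else m := by
    funext m v; split_ifs <;> omega
  rw [hf]
  congr 1
  simp [PySem.List.pyGet?, PySem.List.pyIdx?]

-- A's occurrence counter equals the length of the position list
theorem pv_czy_eq (s : List (Int × Int)) (L : List Int) (mx : Int) :
    pvA_czy s L mx = ((pvPoz (L.map (pvVal s)) mx).length : Int) := by
  unfold pvA_czy pvPoz
  rw [PySem.List.foldl_pyRange_zero_pyGetD' L 0
        (fun c v => if mx == pvVal s v then c + 1 else c) 0]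
  rw [PySem.List.foldl_if_add_one]
  have h1 : List.countP (fun v => mx == pvVal s v) L
      = List.countP (fun v => v == mx) (L.map (pvVal s)) := by
    rw [List.countP_map]
    exact List.countP_congr (fun v _ => by simp [Function.comp, pv_beq_comm])
  have h2 : List.countP (fun v => v == mx) (L.map (pvVal s))
      = List.countP (fun p => p.2 == mx) (PySem.List.enumerate (L.map (pvVal s))) := by
    conv_lhs => rw [← PySem.List.map_snd_enumerate (L.map (pvVal s)) 0]
    rw [List.countP_map]
    rfl
  simp only [List.length_map]
  rw [h1, h2, ← List.countP_eq_length_filter]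
  simp

-- the position list as a filter of the index range
theorem pv_poz_filter (W : List Int) (mx : Int) :
    pvPoz W mx = (PySem.List.pyRange 0 (W.length : Int) 1).filter
      (fun j => PySem.List.pyGetD W j 0 == mx) := by
  unfold pvPoz
  rw [PySem.List.enumerate_eq_map_pyRange W 0, List.filter_map, List.map_map]
  simp only [Function.comp_def]
  simp

-- generic: find? through a filter
theorem pv_find_filter {α : Type} (l : List α) (p q : α → Bool) :
    (l.filter p).find? q = l.find? (fun a => p a && q a) := by
  induction l with
  | nil => rfl
  | cons a t ih =>
    by_cases hp : p a <;> by_cases hq : q a <;>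
      simp [List.find?, hp, hq, ih]

-- generic: find? only depends on predicate values on members
theorem pv_find_congr {α : Type} {l : List α} {p q : α → Bool}
    (h : ∀ a ∈ l, p a = q a) : l.find? p = l.find? q := by
  induction l with
  | nil => rfl
  | cons a t ih =>
    have ha := h a (by simp)
    by_cases hp : p a = true
    · simp [List.find?, hp, ha ▸ hp]
    · have hq : q a = false := by rw [← ha]; exact Bool.of_not_eq_true hp
      have hp' : p a = false := Bool.of_not_eq_true hp
      simp only [List.find?, hp', hq]
      exact ih fun a ha' => h a (List.mem_cons_of_mem _ ha')

-- A's final scan equals find? over the position list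
theorem pv_szukaj_eq (s : List (Int × Int)) (L : List Int) (mx q : Int) :
    pvA_szukaj s L mx q
      = ((pvPoz (L.map (pvVal s)) mx).find? (fun k => k != q)).getD 0 := by
  rw [pv_poz_filter, pv_find_filter]
  unfold pvA_szukaj
  have hlen : ((L.map (pvVal s)).length : Int) = (L.length : Int) := by simp
  rw [hlen]
  congr 1
  apply pv_find_congr
  intro j hj
  have hj' := PySem.List.mem_pyRange_one.mp hj
  have h0 : PySem.List.pyGetD (L.map (pvVal s)) j 0 = pvVal s (PySem.List.pyGetD L j 0) := by
    rw [PySem.List.pyGetD_of_nonneg _ _ hj'.1, PySem.List.pyGetD_of_nonneg _ _ hj'.1]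
    have hlt : j.toNat < L.length := by
      have := hj'.2; omega
    rw [List.getD_eq_getElem _ _ (by simpa using hlt), List.getD_eq_getElem _ _ hlt]
    simp
  simp [h0]

-- ===== facts about the normal form =====

theorem pv_maxOf_cons (w : Int) (t : List Int) :
    pvMaxOf (w :: t) = t.foldl max w := by
  unfold pvMaxOf
  rw [pv_step_is_max]
  simp [PySem.List.pyGet?, PySem.List.pyIdx?, List.foldl, max_self]

-- every element is ≤ the max
theorem pv_le_maxOf (W : List Int) (h : W ≠ []) : ∀ v ∈ W, v ≤ pvMaxOf W := by
  obtain ⟨w, t, rfl⟩ := List.exists_cons_of_ne_nil h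
  rw [pv_maxOf_cons]
  intro v hv
  rcases List.mem_cons.mp hv with h1 | h2
  · exact h1 ▸ (PySem.List.le_foldl_max t w).1
  · exact (PySem.List.le_foldl_max t w).2 v h2

-- foldl max lands on the seed or a member
theorem pv_foldl_max_mem (t : List Int) (a : Int) :
    t.foldl max a = a ∨ t.foldl max a ∈ t := by
  induction t generalizing a with
  | nil => left; rfl
  | cons b t ih =>
    rcases ih (max a b) with h | h
    · rw [List.foldl_cons, h]
      rcases max_choice a b with h' | h'
      · left; exact h'
      · right; simp [h']
    · right; simp [List.foldl_cons, h]

-- the max is attained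
theorem pv_maxOf_mem (W : List Int) (h : W ≠ []) : pvMaxOf W ∈ W := by
  obtain ⟨w, t, rfl⟩ := List.exists_cons_of_ne_nil h
  rw [pv_maxOf_cons]
  rcases pv_foldl_max_mem t w with h1 | h2
  · simp [h1]
  · simp [h2]

-- positions of a value not in the list: none
theorem pv_poz_not_mem (W : List Int) (m : Int) (h : m ∉ W) : pvPoz W m = [] := by
  unfold pvPoz
  rw [List.map_eq_nil_iff, List.filter_eq_nil_iff]
  intro p hp
  obtain ⟨k, hk, rfl⟩ := (PySem.List.mem_enumerate_iff W 0 p).mp hp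
  simp only [beq_iff_eq]
  intro hc
  exact h (hc ▸ List.getElem_mem hk)

-- positions of an attained value: at least one
theorem pv_poz_ne_nil (W : List Int) (m : Int) (h : m ∈ W) : pvPoz W m ≠ [] := by
  obtain ⟨k, hk, hkv⟩ := List.mem_iff_getElem.mp h
  unfold pvPoz
  simp only [ne_eq, List.map_eq_nil_iff, List.filter_eq_nil_iff, not_forall]
  exact ⟨((0 : Int) + k, W[k]), (PySem.List.mem_enumerate_iff W 0 _).mpr ⟨k, hk, rfl⟩,
    by simp [hkv]⟩

-- every position is nonnegative
theorem pv_poz_nonneg (W : List Int) (m : Int) : ∀ i ∈ pvPoz W m, 0 ≤ i := by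
  intro i hi
  unfold pvPoz at hi
  obtain ⟨p, hp, rfl⟩ := List.mem_map.mp hi
  obtain ⟨k, hk, rfl⟩ := (PySem.List.mem_enumerate_iff W 0 p).mp (List.mem_of_mem_filter hp)
  simp

-- the position list is strictly increasing
theorem pv_poz_pairwise (W : List Int) (m : Int) : (pvPoz W m).Pairwise (· < ·) := by
  unfold pvPoz
  rw [List.pairwise_map]
  exact (PySem.List.pairwise_lt_enumerate W 0).sublist List.filter_sublist

-- a strictly increasing list with ≥ 2 elements has one element ≠ q
theorem pv_find_ne_isSome (P : List Int) (q : Int)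
    (hp : P.Pairwise (· < ·)) (hl : 2 ≤ P.length) :
    (P.find? (fun i => i != q)).isSome = true := by
  match P, hl with
  | a :: b :: t, _ =>
    have hab : a < b := (List.pairwise_cons.mp hp).1 b (by simp)
    by_cases ha : a = q
    · have hb : (b != q) = true := by simp; omega
      have ha' : (a != q) = false := by simp [ha]
      simp [List.find?, ha', hb]
    · have ha' : (a != q) = true := by simp [ha]
      simp [List.find?, ha']

-- snoc facts
theorem pv_get0_snoc (p : List Int) (a : Int) (h : p ≠ []) :
    (PySem.List.pyGet? (p ++ [a]) 0).getD 0 = (PySem.List.pyGet? p 0).getD 0 := by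
  obtain ⟨w, t, rfl⟩ := List.exists_cons_of_ne_nil h
  have h0 : (0 : Int) ≤ (t.length : Int) + 1 := by positivity
  simp [PySem.List.pyGet?, PySem.List.pyIdx?, h0]

theorem pv_maxOf_snoc (p : List Int) (a : Int) (h : p ≠ []) :
    pvMaxOf (p ++ [a]) = max (pvMaxOf p) a := by
  obtain ⟨w, t, rfl⟩ := List.exists_cons_of_ne_nil h
  rw [List.cons_append, pv_maxOf_cons, pv_maxOf_cons, List.foldl_append]
  simp

theorem pv_poz_snoc (p : List Int) (a m : Int) :
    pvPoz (p ++ [a]) m = pvPoz p m ++ (if a == m then [(p.length : Int)] else []) := by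
  unfold pvPoz
  rw [PySem.List.enumerate_append, List.filter_append, List.map_append]
  congr 1
  by_cases h : a == m <;>
    simp [PySem.List.enumerate, h]

-- enumerate commutes with map on the values
theorem pv_enum_map {α β : Type} (f : α → β) (l : List α) (s : Int) :
    PySem.List.enumerate (l.map f) s = (PySem.List.enumerate l s).map (fun p => (p.1, f p.2)) := by
  induction l generalizing s with
  | nil => rfl
  | cons a t ih => simp [PySem.List.enumerate_cons, ih]

-- pvBStep on an explicit state tuple
theorem pvBStep_eq (oprocz m cnt first alt i v : Int) :
    pvBStep oprocz (m, cnt, first, alt) i v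
      = if v > m then (v, 1, i, if i ≠ oprocz then i else -1)
        else if v == m then (m, cnt + 1, first, if alt < 0 ∧ i ≠ oprocz then i else alt)
        else (m, cnt, first, alt) := rfl

-- ===== the one-pass loop invariant =====
theorem pv_fold_inv (oprocz : Int) (W : List Int) (h : W ≠ []) :
    (PySem.List.enumerate W).foldl (fun st p => pvBStep oprocz st p.1 p.2)
        ((PySem.List.pyGet? W 0).getD 0, 0, 0, -1)
      = (pvMaxOf W, ((pvPoz W (pvMaxOf W)).length : Int),
          (pvPoz W (pvMaxOf W)).headD 0,
          ((pvPoz W (pvMaxOf W)).find? (fun i => i != oprocz)).getD (-1)) := by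
  induction W using List.reverseRecOn with
  | nil => exact absurd rfl h
  | append_singleton p a ih =>
    by_cases hp : p = []
    · subst hp
      simp only [List.nil_append]
      have hM : pvMaxOf [a] = a := by rw [pv_maxOf_cons]; rfl
      have hP : pvPoz [a] a = [(0 : Int)] := by
        simp [pvPoz, PySem.List.enumerate_cons, PySem.List.enumerate_nil]
      have hget : (PySem.List.pyGet? [a] 0).getD 0 = a := by
        simp [PySem.List.pyGet?, PySem.List.pyIdx?]
      rw [hget, hM, hP]
      have henum : PySem.List.enumerate [a] = [((0 : Int), a)] := by
        simp [PySem.List.enumerate_cons, PySem.List.enumerate_nil]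
      rw [henum]
      simp only [List.foldl_cons, List.foldl_nil]
      rw [pvBStep_eq, if_neg (by omega : ¬ a > a), if_pos (by simp)]
      by_cases ho : (0 : Int) = oprocz
      · have hb : ((0 : Int) != oprocz) = false := by simp [ho]
        simp [List.find?, hb, ho]
      · have hb : ((0 : Int) != oprocz) = true := by simp [ho]
        simp [List.find?, hb, ho]
    · -- p nonempty: split the fold at the last element
      have hM := pv_maxOf_snoc p a hp
      rw [PySem.List.enumerate_append, List.foldl_append, pv_get0_snoc p a hp, ih hp]
      set M := pvMaxOf p with hMdef
      set P := pvPoz p M with hPdef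
      set n : Int := (p.length : Int) with hndef
      have henum1 : PySem.List.enumerate [a] ((0 : Int) + n) = [(n, a)] := by
        simp [PySem.List.enumerate_cons, PySem.List.enumerate_nil]
      rw [henum1]
      have hPne : P ≠ [] := pv_poz_ne_nil p M (pv_maxOf_mem p hp)
      simp only [List.foldl_cons, List.foldl_nil]
      rw [pvBStep_eq]
      rcases lt_trichotomy a M with hlt | heq | hgt
      · -- a < M: nothing changes
        have hM' : pvMaxOf (p ++ [a]) = M := by rw [hM]; omega
        have hfa : (a == M) = false := by simp; omega
        have hP' : pvPoz (p ++ [a]) M = P := by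
          rw [pv_poz_snoc, hfa]
          simp only [Bool.false_eq_true, if_false, List.append_nil]
          rw [hPdef]
        rw [hM', hP', if_neg (by omega : ¬ a > M), if_neg (by simp [hfa])]
      · -- a = M: append position n
        have hM' : pvMaxOf (p ++ [a]) = M := by rw [hM]; omega
        have h2 : (a == M) = true := by simp [heq]
        have hP' : pvPoz (p ++ [a]) M = P ++ [n] := by
          rw [pv_poz_snoc, h2]
          simp only [if_true]
          rw [hPdef, hndef]
        rw [hM', hP', if_neg (by omega : ¬ a > M), if_pos h2]
        have hlen : ((P ++ [n]).length : Int) = (P.length : Int) + 1 := by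
          simp
        have hhead : (P ++ [n]).headD 0 = P.headD 0 := by
          obtain ⟨y, t, hyt⟩ := List.exists_cons_of_ne_nil hPne
          rw [hyt]; simp
        have hfind : ((P ++ [n]).find? (fun i => i != oprocz)).getD (-1)
            = if (P.find? (fun i => i != oprocz)).getD (-1) < 0 ∧ n ≠ oprocz then n
              else (P.find? (fun i => i != oprocz)).getD (-1) := by
          rw [List.find?_append]
          cases hf : P.find? (fun i => i != oprocz) with
          | some y =>
            have hy0 : 0 ≤ y := pv_poz_nonneg p M y (List.mem_of_find?_eq_some hf)
            have hny : ¬ ((some y).getD (-1) < 0 ∧ n ≠ oprocz) := by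
              simp only [Option.getD_some]
              intro hc; omega
            rw [if_neg hny]
            simp
          | none =>
            simp only [Option.getD_none, Option.none_or]
            by_cases ho : n = oprocz
            · have hb : (n != oprocz) = false := by simp [ho]
              simp [List.find?, hb, ho]
            · have hb : (n != oprocz) = true := by simp [ho]
              simp [List.find?, hb, ho]
        rw [hfind, hlen, hhead]
      · -- a > M: reset
        have hM' : pvMaxOf (p ++ [a]) = a := by rw [hM]; omega
        have hnotin : a ∉ p := fun hmem => by
          have := pv_le_maxOf p hp a hmem; omega
        have hP' : pvPoz (p ++ [a]) a = [n] := by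
          rw [pv_poz_snoc, pv_poz_not_mem p a hnotin, if_pos (by simp), List.nil_append, hndef]
        rw [hM', hP', if_pos (by omega : a > M)]
        have hl1 : (([n] : List Int).length : Int) = 1 := by simp
        have hh1 : ([n] : List Int).headD 0 = n := rfl
        rw [hl1, hh1]
        by_cases ho : n = oprocz
        · have hb : (n != oprocz) = false := by simp [ho]
          have hfind : (([n].find? (fun i => i != oprocz))).getD (-1) = -1 := by
            simp [List.find?, hb]
          rw [hfind, if_neg (fun hc => hc ho)]
        · have hb : (n != oprocz) = true := by simp [ho]
          have hfind : (([n].find? (fun i => i != oprocz))).getD (-1) = n := by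
            simp [List.find?, hb]
          rw [hfind, if_pos ho]

-- the initial max of B is the head value
theorem pv_init_eq (s : List (Int × Int)) (ramki : List (List Int)) (x : Int) (h : ramki ≠ []) :
    pvVal s ((PySem.List.pyGet? ((PySem.List.pyGet? ramki 0).getD []) x).getD 0)
      = (PySem.List.pyGet? (ramki.map (fun r => pvVal s ((PySem.List.pyGet? r x).getD 0))) 0).getD 0 := by
  obtain ⟨r0, t, rfl⟩ := List.exists_cons_of_ne_nil h
  simp [PySem.List.pyGet?, PySem.List.pyIdx?]

theorem znajdz_main (strony_odwolania : List (Int × Int)) (ramki : List (List Int)) (oprocz : Int) (x : Int) (h : ramki ≠ []) :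
    znajdz_maximum_slownik strony_odwolania ramki oprocz x
      = znajdz_maximum_slownik_alt strony_odwolania ramki oprocz x := by
  have hmap : ramki.map (fun r => (PySem.List.pyGet? r x).getD 0) ≠ [] := by simpa using h
  simp only [znajdz_maximum_slownik, znajdz_maximum_slownik_alt]
  rw [pv_dostepne_eq, pv_max_eq _ _ hmap, pv_czy_eq, pv_szukaj_eq]
  simp only [List.map_map, Function.comp_def]
  set W := ramki.map (fun r => pvVal strony_odwolania ((PySem.List.pyGet? r x).getD 0)) with hW
  have hWne : W ≠ [] := by rw [hW]; simpa using h
  -- rewrite B's fold over enumerate ramki as the fold over enumerate W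
  have hfold :
      (PySem.List.enumerate ramki).foldl
          (fun st p => pvBStep oprocz st p.1 (pvVal strony_odwolania ((PySem.List.pyGet? p.2 x).getD 0)))
          (pvVal strony_odwolania
            ((PySem.List.pyGet? ((PySem.List.pyGet? ramki 0).getD []) x).getD 0), 0, 0, -1)
        = (PySem.List.enumerate W).foldl (fun st p => pvBStep oprocz st p.1 p.2)
            ((PySem.List.pyGet? W 0).getD 0, 0, 0, -1) := by
    rw [pv_init_eq strony_odwolania ramki x h, hW, pv_enum_map, List.foldl_map]
  rw [hfold, pv_fold_inv oprocz W hWne]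
  set M := pvMaxOf W with hM
  set P := pvPoz W M with hP
  have hPne : P ≠ [] := pv_poz_ne_nil W M (pv_maxOf_mem W hWne)
  by_cases hn : P.length = 1
  · obtain ⟨p0, hp0⟩ := List.length_eq_one_iff.mp hn
    have hpmem : p0 ∈ P := by simp [hp0]
    have hppos : 0 ≤ p0 := pv_poz_nonneg W M p0 hpmem
    have hc1 : ((P.length : Int) == 1) = true := by simp [hn]
    rw [hc1]
    simp only [if_true, hp0]
    have hne : (p0 != (-1 : Int)) = true := by
      simp only [bne_iff_ne, ne_eq]; omega
    simp [List.find?, hne]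
  · have hc1 : ((P.length : Int) == 1) = false := by simp [hn]
    rw [hc1]
    simp only [if_false]
    have hl2 : 2 ≤ P.length := by
      have hl0 : P.length ≠ 0 := fun h0 => hPne (List.length_eq_zero_iff.mp h0)
      omega
    have hsome := pv_find_ne_isSome P oprocz (pv_poz_pairwise W M) hl2
    cases hf : P.find? (fun i => i != oprocz) with
    | none => rw [hf] at hsome; simp at hsome
    | some y => simp [hf]

-- ===== VERDICT (by name: the statement is the Claim_ definition above) =====
theorem znajdz_maximum_slownik_spec : Claim_equal_znajdz_maximum_slownik := by
  intro s r o x _ hpre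
  unfold Spec_znajdz_maximum_slownik
  exact znajdz_main s r o x hpre.1
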